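-- pv_equiv track=rewrite | github.com/subhendudash02/PoD-VITCC | Longest_ordered_vowel_sequence.py | inSequence
-- ===== SOURCE A (Python) =====
-- def vowel_coll(word, vowel):
--     s = []
--     for i in word:
--         if i in vowel and i not in s:
--             s.append(i)
--     return s
--
-- def inSequence(word, vowel):
--     k = vowel_coll(word, vowel)
--     x = k[0]
--     for i in range(1, len(k)):
--         if k[i] < x:
--             return False
--     else:
--         return True
-- ===== SOURCE B (Python) =====
-- def vowel_coll(word, vowel):
--     return [c for c in word if c in vowel]
--
-- def inSequence(word, vowel):
--     k = vowel_coll(word, vowel)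
--     return k[0] == min(k)
-- ===== Notes on version B (the rewrite author's own statement) =====
-- stated objective: simpler
-- what changed: B drops A's ordered dedup set and index loop with short-circuit: it collects all vowel occurrences and returns whether the first one equals the minimum, computed as a single reduction.
import Mathlib
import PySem

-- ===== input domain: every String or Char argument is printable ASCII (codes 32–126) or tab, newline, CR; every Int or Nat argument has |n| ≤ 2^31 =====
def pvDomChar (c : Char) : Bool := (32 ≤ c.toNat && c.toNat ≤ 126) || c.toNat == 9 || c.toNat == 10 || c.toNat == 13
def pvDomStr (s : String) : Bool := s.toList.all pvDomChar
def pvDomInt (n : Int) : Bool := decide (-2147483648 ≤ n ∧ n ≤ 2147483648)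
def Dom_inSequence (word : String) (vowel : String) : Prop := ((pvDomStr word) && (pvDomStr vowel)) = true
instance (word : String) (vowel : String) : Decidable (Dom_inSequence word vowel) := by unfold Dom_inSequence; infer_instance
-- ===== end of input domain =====

-- B replaces A's ordered dedup set and index loop by "first collected vowel == min of all collected vowels" (simpler; return value only).

-- ===== PORT A =====
-- s.append(i) guarded by 'i in vowel and i not in s', folded over word
def vowelColl (word : String) (vowel : String) : List Char :=
  word.toList.foldl (fun s i => if i ∈ vowel.toList ∧ ¬ i ∈ s then s ++ [i] else s) []

-- 'for i in range(1, len(k)): if k[i] < x: return False / else: return True' over the tail of k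
def inSeqLoop (x : Char) : List Char → Bool
  | [] => true
  | c :: cs => if c < x then false else inSeqLoop x cs

def inSequence (word : String) (vowel : String) : Bool :=
  match vowelColl word vowel with
  | [] => false          -- Python raises IndexError at k[0]; excluded by Pre_inSequence
  | x :: rest => inSeqLoop x rest

-- ===== PORT B =====
def vowelCollAlt (word : String) (vowel : String) : List Char :=
  word.toList.filter (fun c => decide (c ∈ vowel.toList))

def inSequence_alt (word : String) (vowel : String) : Bool :=
  match vowelCollAlt word vowel, PySem.List.min? (vowelCollAlt word vowel) (fun c => c) with
  | x :: _, some m => x == m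
  | _, _ => false        -- Python raises IndexError at k[0]; excluded by Pre_inSequence

-- ===== PRECONDITION & SPEC =====
-- Pre_ excludes exactly the inputs with no character of word in vowel, where both A and B raise IndexError at k[0].
def Pre_inSequence (word : String) (vowel : String) : Prop :=
  word.toList.any (fun c => decide (c ∈ vowel.toList)) = true
instance (word : String) (vowel : String) : Decidable (Pre_inSequence word vowel) := by
  unfold Pre_inSequence; infer_instance

def pvWitness_inSequence : String × String := ("able", "aeiou")

def Spec_inSequence (word : String) (vowel : String) (out : Bool) : Prop := out = inSequence_alt word vowel
instance (word : String) (vowel : String) (out : Bool) : Decidable (Spec_inSequence word vowel out) := by unfold Spec_inSequence; infer_instance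

-- ===== CLAIM (what is proved, stated in full; the proofs are below) =====
def Claim_equal_inSequence : Prop := ∀ (word : String) (vowel : String), Dom_inSequence word vowel → Pre_inSequence word vowel → Spec_inSequence word vowel (inSequence word vowel)

-- ===== LEMMAS AND PROOFS =====

-- A's fold is Python's ordered-dedup (PySem.Set) fold over the filtered list
theorem vowelColl_foldl (vowel : String) (l : List Char) (s : List Char) :
    l.foldl (fun s i => if i ∈ vowel.toList ∧ ¬ i ∈ s then s ++ [i] else s) s
      = (l.filter (fun c => decide (c ∈ vowel.toList))).foldl PySem.Set.add s := by
  induction l generalizing s with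
  | nil => rfl
  | cons c t ih =>
    by_cases hc : c ∈ vowel.toList
    · simp only [List.foldl_cons, List.filter_cons, hc, decide_true, if_pos]
      rw [ih]
      congr 1
      by_cases hs : c ∈ s <;> simp [PySem.Set.add, hs]
    · simp only [List.foldl_cons, List.filter_cons, hc, decide_false]
      simp only [false_and, Bool.false_eq_true, if_neg, not_false_iff]
      exact ih s

theorem vowelColl_eq_ofList (word vowel : String) :
    vowelColl word vowel = PySem.Set.ofList (vowelCollAlt word vowel) := by
  unfold vowelColl vowelCollAlt PySem.Set.ofList PySem.Set.empty
  exact vowelColl_foldl vowel word.toList []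

theorem foldl_add_prefix {α : Type} [BEq α] (t : List α) (s : PySem.Set α) :
    ∃ r, t.foldl PySem.Set.add s = s ++ r := by
  induction t generalizing s with
  | nil => exact ⟨[], by simp⟩
  | cons c t ih =>
    obtain ⟨r, hr⟩ := ih (PySem.Set.add s c)
    by_cases hcc : List.contains s c = true
    · exact ⟨r, by rw [List.foldl_cons, hr]; simp [PySem.Set.add, hcc]⟩
    · exact ⟨c :: r, by rw [List.foldl_cons, hr]; simp [PySem.Set.add, hcc]⟩

theorem inSeqLoop_eq_true (x : Char) (l : List Char) :
    inSeqLoop x l = true ↔ ∀ c ∈ l, x ≤ c := by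
  induction l with
  | nil => simp [inSeqLoop]
  | cons c t ih =>
    unfold inSeqLoop
    by_cases h : c < x
    · simp [h, not_le.mpr h]
    · simp [h, ih, not_lt.mp h]

theorem inSequence_spec_aux (word vowel : String) (h : Pre_inSequence word vowel) :
    inSequence word vowel = inSequence_alt word vowel := by
  unfold inSequence inSequence_alt
  set F := vowelCollAlt word vowel with hFdef
  have hF : F ≠ [] := by
    intro hnil
    unfold Pre_inSequence at h
    rw [List.any_eq_true] at h
    obtain ⟨c, hc, hcv⟩ := h
    have : c ∈ word.toList.filter (fun c => decide (c ∈ vowel.toList)) :=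
      List.mem_filter.mpr ⟨hc, hcv⟩
    rw [hFdef] at hnil
    unfold vowelCollAlt at hnil
    simp [hnil] at this
  obtain ⟨x, t, hFx⟩ := List.exists_cons_of_ne_nil hF
  have hK : ∃ r, vowelColl word vowel = x :: r := by
    rw [vowelColl_eq_ofList, ← hFdef, hFx]
    unfold PySem.Set.ofList
    simp only [List.foldl_cons]
    have hadd : PySem.Set.add PySem.Set.empty x = [x] := by
      simp [PySem.Set.add, PySem.Set.empty, PySem.Set.contains]
    rw [hadd]
    obtain ⟨r, hr⟩ := foldl_add_prefix t [x]
    exact ⟨r, by simpa using hr⟩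
  obtain ⟨r, hKr⟩ := hK
  have hmemKF : ∀ c, c ∈ vowelColl word vowel ↔ c ∈ F := by
    intro c; rw [vowelColl_eq_ofList, ← hFdef]; exact PySem.Set.mem_ofList F c
  obtain ⟨m, hm⟩ : ∃ m, PySem.List.min? F (fun c => c) = some m := by
    cases hmo : PySem.List.min? F (fun c => c) with
    | none => exact absurd ((PySem.List.min?_eq_none_iff F _).mp hmo) hF
    | some m => exact ⟨m, rfl⟩
  have hmF : m ∈ F := PySem.List.min?_mem hm
  have hmin : ∀ y ∈ F, m ≤ y := PySem.List.min?_isMin hm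
  have hxF : x ∈ F := hFx ▸ List.mem_cons_self
  have key : (∀ c ∈ r, x ≤ c) ↔ x = m := by
    constructor
    · intro hall
      have hxall : ∀ c ∈ F, x ≤ c := by
        intro c hc
        have hcK : c ∈ x :: r := hKr ▸ (hmemKF c).mpr hc
        rcases List.mem_cons.mp hcK with hcx | hcr
        · exact hcx ▸ le_refl x
        · exact hall c hcr
      exact le_antisymm (hxall m hmF) (hmin x hxF)
    · intro hxm c hc
      have hcF : c ∈ F := (hmemKF c).mp (hKr ▸ List.mem_cons_of_mem x hc)
      exact hxm ▸ hmin c hcF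
  have hgoal : inSeqLoop x r = (x == m) := by
    rw [Bool.eq_iff_iff, inSeqLoop_eq_true, beq_iff_eq]
    exact key
  rw [hm, hKr, hFx]
  exact hgoal

-- ===== VERDICT (by name: the statement is the Claim_ definition above) =====
theorem inSequence_spec : Claim_equal_inSequence := by
  intro word vowel _ hpre
  exact inSequence_spec_aux word vowel hpre
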